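-- pv_equiv track=rewrite | github.com/juanpablozunigahidalgo/HackerTest | counter.py | reduceCapacity
-- ===== SOURCE A (Python) =====
-- from collections import Counter
--
-- def reduceCapacity(model):
--     n = len(model)
--     # ceiling of n/2, using integers only
--     target = (n + 1) // 2
--
--     freq = list(Counter(model).values())
--     freq.sort(reverse=True)
--
--     total = 0
--     models_used = 0
--
--     for f in freq:
--         total += f
--         models_used += 1
--         if total >= target:
--             return models_used
--
--     return models_used
-- ===== SOURCE B (Python) =====
-- def reduceCapacity(model):
--     n = len(model)
--     target = (n + 1) // 2
--
--     freq = {}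
--     for x in model:
--         freq[x] = freq.get(x, 0) + 1
--     vals = list(freq.values())
--
--     # counting-sort-style bucket table over frequency values: no comparison sort
--     max_f = max(vals, default=0)
--     cnt = {}
--     for f in vals:
--         cnt[f] = cnt.get(f, 0) + 1
--
--     total = 0
--     used = 0
--     for f in range(max_f, 0, -1):
--         for _ in range(cnt.get(f, 0)):
--             total += f
--             used += 1
--             if total >= target:
--                 return used
--     return used
-- ===== Notes on version B (the rewrite author's own statement) =====
-- stated objective: alternative
-- what changed: Replaces the comparison sort of the frequency list by a counting-sort-style bucket table indexed by frequency value, traversed from the maximum frequency downward with a multiplicity inner loop.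
import Mathlib
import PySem

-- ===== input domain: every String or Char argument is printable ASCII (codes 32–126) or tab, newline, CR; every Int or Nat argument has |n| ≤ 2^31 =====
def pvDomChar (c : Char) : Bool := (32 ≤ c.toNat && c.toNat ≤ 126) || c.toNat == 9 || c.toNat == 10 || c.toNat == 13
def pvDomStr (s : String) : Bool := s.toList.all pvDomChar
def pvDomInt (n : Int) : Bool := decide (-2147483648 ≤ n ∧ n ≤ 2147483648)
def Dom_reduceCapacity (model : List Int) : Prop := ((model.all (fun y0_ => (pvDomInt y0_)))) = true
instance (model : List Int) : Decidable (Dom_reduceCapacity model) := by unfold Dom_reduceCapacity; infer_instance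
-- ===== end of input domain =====

-- B replaces A's comparison sort of the frequency list by a bucket table indexed by
-- frequency value, traversed from the maximum frequency downward (objective: alternative).

-- ===== PORT A =====
-- A's for-loop over the descending frequency list with early return
def pvALoop (target : Int) : List Int → Int → Int → Int
  | [], _, used => used
  | f :: rest, total, used =>
      if target ≤ total + f then used + 1 else pvALoop target rest (total + f) (used + 1)

def reduceCapacity (model : List Int) : Int :=
  let n : Int := model.length
  let target := PySem.Int.floordiv (n + 1) 2
  let freq := (PySem.Dict.counter model).values
  let freqs := PySem.List.sorted freq (fun x => x) true
  pvALoop target freqs 0 0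

-- ===== PORT B =====
-- B's inner loop: take c models of frequency fv; inl = loop state to continue, inr = early return
def pvBInner (fv target : Int) : Nat → Int → Int → (Int × Int) ⊕ Int
  | 0, total, used => Sum.inl (total, used)
  | c + 1, total, used =>
      if target ≤ total + fv then Sum.inr (used + 1)
      else pvBInner fv target c (total + fv) (used + 1)

-- B's outer loop: f runs over range(max_f, 0, -1); at step f+1 the model count is cnt.get(f+1, 0)
def pvBOuter (target : Int) (cnt : PySem.Dict Int Int) : Nat → Int → Int → Int
  | 0, _, used => used
  | f + 1, total, used =>
      match pvBInner ((f : Int) + 1) target (cnt.getD ((f : Int) + 1) 0).toNat total used with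
      | Sum.inr r => r
      | Sum.inl (t, u) => pvBOuter target cnt f t u

def reduceCapacity_alt (model : List Int) : Int :=
  let n : Int := model.length
  let target := PySem.Int.floordiv (n + 1) 2
  let freq := model.foldl (fun d x => d.insert x (d.getD x 0 + 1)) PySem.Dict.empty
  let vals := freq.values
  let maxf := PySem.List.maxD vals (fun x => x) 0
  let cnt := vals.foldl (fun d f => d.insert f (d.getD f 0 + 1)) PySem.Dict.empty
  pvBOuter target cnt maxf.toNat 0 0

-- ===== PRECONDITION & SPEC =====
def Spec_reduceCapacity (model : List Int) (out : Int) : Prop := out = reduceCapacity_alt model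
instance (model : List Int) (out : Int) : Decidable (Spec_reduceCapacity model out) := by unfold Spec_reduceCapacity; infer_instance

-- ===== CLAIM (what is proved, stated in full; the proofs are below) =====
def Claim_equal_reduceCapacity : Prop := ∀ (model : List Int), Dom_reduceCapacity model → Spec_reduceCapacity model (reduceCapacity model)

-- ===== LEMMAS AND PROOFS =====

-- descending multiset of frequencies that B's double loop consumes: cnt.getD f copies of each f, f from F down to 1
def pvBucket (cnt : PySem.Dict Int Int) : Nat → List Int
  | 0 => []
  | f + 1 => List.replicate (cnt.getD ((f : Int) + 1) 0).toNat ((f : Int) + 1) ++ pvBucket cnt f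

lemma pvInner_eq (fv target : Int) :
    ∀ (c : Nat) (total used : Int) (rest : List Int),
      pvALoop target (List.replicate c fv ++ rest) total used =
        (match pvBInner fv target c total used with
          | Sum.inl (t, u) => pvALoop target rest t u
          | Sum.inr r => r) := by
  intro c
  induction c with
  | zero => intro total used rest; simp [pvBInner]
  | succ c ih =>
      intro total used rest
      simp only [List.replicate_succ, List.cons_append, pvALoop, pvBInner]
      split_ifs with h
      · rfl
      · exact ih (total + fv) (used + 1) rest

lemma pvOuter_eq (target : Int) (cnt : PySem.Dict Int Int) :
    ∀ (F : Nat) (total used : Int),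
      pvBOuter target cnt F total used = pvALoop target (pvBucket cnt F) total used := by
  intro F
  induction F with
  | zero => intro total used; simp [pvBOuter, pvBucket, pvALoop]
  | succ f ih =>
      intro total used
      rw [pvBOuter, pvBucket, pvInner_eq]
      cases h : pvBInner ((f : Int) + 1) target (cnt.getD ((f : Int) + 1) 0).toNat total used with
      | inl tu => cases tu with | mk t u => simp [ih]
      | inr r => simp

lemma pvBucket_count (cnt : PySem.Dict Int Int) (F : Nat) (x : Int) :
    (pvBucket cnt F).count x =
      if 1 ≤ x ∧ x ≤ (F : Int) then (cnt.getD x 0).toNat else 0 := by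
  induction F with
  | zero =>
      simp only [pvBucket, List.count_nil, Nat.cast_zero]
      have : ¬ (1 ≤ x ∧ x ≤ (0 : Int)) := by omega
      simp [this]
  | succ f ih =>
      simp only [pvBucket, List.count_append, List.count_replicate, ih]
      by_cases hx : x = (f : Int) + 1
      · subst hx
        have h1 : ¬ ((f : Int) + 1 ≤ (f : Int)) := by omega
        have h2 : (1 : Int) ≤ (f : Int) + 1 ∧ (f : Int) + 1 ≤ ((f + 1 : Nat) : Int) := by push_cast; omega
        simp [h1, h2]
      · have h1 : ((f : Int) + 1 == x) = false := by
          rw [beq_eq_false_iff_ne]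
          omega
        rw [h1]
        simp only [Bool.false_eq_true, if_false, zero_add]
        split_ifs with hA hB <;> first | rfl | (exfalso; push_cast at * ; omega)

lemma pvBucket_mem (cnt : PySem.Dict Int Int) (F : Nat) (x : Int) :
    x ∈ pvBucket cnt F → 1 ≤ x ∧ x ≤ (F : Int) := by
  induction F with
  | zero => simp [pvBucket]
  | succ f ih =>
      intro hx
      rcases List.mem_append.mp hx with h | h
      · have := List.eq_of_mem_replicate h
        subst this
        push_cast
        omega
      · have := ih h
        push_cast
        omega

lemma pvBucket_pairwise (cnt : PySem.Dict Int Int) (F : Nat) :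
    (pvBucket cnt F).Pairwise (fun a b : Int => b ≤ a) := by
  induction F with
  | zero => simp [pvBucket]
  | succ f ih =>
      rw [pvBucket, List.pairwise_append]
      refine ⟨List.pairwise_replicate.mpr (Or.inr le_rfl), ih, ?_⟩
      intro a ha b hb
      have ha' := List.eq_of_mem_replicate ha
      have hb' := pvBucket_mem cnt f b hb
      omega

-- for a list of positive values, B's bucket list IS A's reverse-sorted list
lemma pvBucket_eq_sorted (vals : List Int) (hv : ∀ v ∈ vals, 1 ≤ v) :
    PySem.List.sorted vals (fun x => x) true =
      pvBucket (PySem.Dict.counter vals) (PySem.List.maxD vals (fun x => x) 0).toNat := by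
  set cnt := PySem.Dict.counter vals with hcnt
  set maxf := PySem.List.maxD vals (fun x => x) 0 with hmaxf
  have hget : ∀ x : Int, cnt.getD x 0 = (vals.count x : Int) := by
    intro x
    rw [hcnt, PySem.Dict.getD_counter]
  have hub : ∀ v ∈ vals, v ≤ maxf := by
    intro v hvm
    rw [hmaxf, PySem.List.maxD]
    cases hm : PySem.List.max? vals (fun x : Int => x) with
    | none =>
        exact absurd (((PySem.List.max?_eq_none_iff vals _).mp hm) ▸ hvm) List.not_mem_nil
    | some m =>
        simp only [Option.getD_some]
        exact PySem.List.max?_isMax hm v hvm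
  have hmaxf_nonneg : 0 ≤ maxf := by
    rcases List.eq_nil_or_concat vals with h | _
    · subst h; rw [hmaxf]; rfl
    · rename_i h
      rcases h with ⟨_, _, rfl⟩
      have hmem : maxf ∈ _ := PySem.List.maxD_mem _ (fun x : Int => x) 0 (by simp)
      have := hv _ hmem
      omega
  have hcast : ((maxf.toNat : Nat) : Int) = maxf := Int.toNat_of_nonneg hmaxf_nonneg
  apply List.Perm.eq_of_pairwise (le := fun a b : Int => b ≤ a)
  · exact fun a b _ _ h1 h2 => le_antisymm h2 h1
  · exact PySem.List.sorted_pairwise_rev vals (fun x => x)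
  · exact pvBucket_pairwise cnt maxf.toNat
  · refine (PySem.List.sorted_perm vals (fun x => x) true).trans ?_
    rw [List.perm_iff_count]
    intro x
    rw [pvBucket_count, hcast]
    by_cases hx : 1 ≤ x ∧ x ≤ maxf
    · rw [if_pos hx, hget, Int.toNat_natCast]
    · simp only [hx, if_false]
      by_cases hmem : x ∈ vals
      · exact absurd ⟨hv x hmem, hub x hmem⟩ hx
      · simp [List.count_eq_zero_of_not_mem hmem]

-- every value of Counter(model) is a positive count
lemma pvCounterVals_pos (model : List Int) :
    ∀ v ∈ (PySem.Dict.counter model).values, 1 ≤ v := by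
  intro v hv
  have hval : (PySem.Dict.counter model).values =
      (PySem.Dict.counter model).items.map (·.2) := rfl
  rw [hval, PySem.Dict.items_counter] at hv
  simp only [List.map_map, List.mem_map] at hv
  rcases hv with ⟨k, hk, rfl⟩
  have hk' : k ∈ model := (PySem.Set.mem_ofList model k).mp hk
  have : 0 < model.count k := List.count_pos_iff.mpr hk'
  simp only [Function.comp]
  omega

-- ===== VERDICT (by name: the statement is the Claim_ definition above) =====
theorem reduceCapacity_spec : Claim_equal_reduceCapacity := by
  intro model _
  unfold Spec_reduceCapacity reduceCapacity reduceCapacity_alt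
  simp only
  simp only [PySem.Dict.foldl_insert_getD_add_one_eq_counter]
  rw [pvOuter_eq, ← pvBucket_eq_sorted _ (pvCounterVals_pos model)]
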